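-- pv_equiv track=rewrite | github.com/jkey-67/spyglass | src/vi/evegate.py | convertRegionNameForDotlan
-- ===== SOURCE A (Python) =====
-- def convertRegionNameForDotlan(name: str) -> str:
--     """
--         Converts a (system)name to the format that dotlan uses
--     """
--     converted = []
--     next_upper = False
--
--     for index, char in enumerate(name):
--         if index == 0:
--             converted.append(char.upper())
--         else:
--             if char in (u" ", u"_"):
--                 char = u"_"
--                 next_upper = True
--             else:
--                 if next_upper:
--                     char = char.upper()
--                 else:
--                     char = char.lower()
--                 next_upper = False
--             converted.append(char)
--     return u"".join(converted)
-- ===== SOURCE B (Python) =====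
-- def convertRegionNameForDotlan(name: str) -> str:
--     """Converts a (system)name to the format that dotlan uses."""
--     if not name:
--         return ""
--     head = name[0].upper()
--     parts = name[1:].replace(" ", "_").split("_")
--     out = [parts[0].lower()]
--     for p in parts[1:]:
--         out.append("_" + p[:1].upper() + p[1:].lower())
--     return head + "".join(out)
-- ===== Notes on version B (the rewrite author's own statement) =====
-- stated objective: idiomatic
-- what changed: Replaces A's stateful per-character loop (a next_upper flag set by separator characters) with a split-words-then-rejoin decomposition: normalise spaces to underscores in the tail, split on underscore, lowercase the first part, re-emit every later part as underscore plus first-char-uppercased plus rest-lowercased, and prepend the uppercased first character.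
import Mathlib
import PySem

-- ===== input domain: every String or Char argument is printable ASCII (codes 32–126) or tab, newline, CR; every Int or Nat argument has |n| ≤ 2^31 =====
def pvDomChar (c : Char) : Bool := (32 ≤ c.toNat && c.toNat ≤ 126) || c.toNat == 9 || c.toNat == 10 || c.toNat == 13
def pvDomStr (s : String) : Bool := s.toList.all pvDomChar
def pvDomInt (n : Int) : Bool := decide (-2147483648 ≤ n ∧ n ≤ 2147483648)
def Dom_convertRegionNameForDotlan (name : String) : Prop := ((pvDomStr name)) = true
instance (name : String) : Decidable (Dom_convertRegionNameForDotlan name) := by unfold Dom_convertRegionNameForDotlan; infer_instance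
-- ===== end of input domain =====

-- B replaces the stateful per-character next_upper loop with a split-on-separators / recapitalize-and-rejoin decomposition (idiomatic; measured faster via C-level str.replace/split).


-- ===== PORT A =====
-- A's for-loop over enumerate(name) with the (converted, next_upper) state, index tested against 0.
def convA_loop : Nat → List Char → Bool → List Char → List Char
  | _, converted, _, [] => converted
  | index, converted, next_upper, c :: cs =>
    if index == 0 then
      convA_loop (index + 1) (converted ++ [PySem.Chars.upperChar c]) next_upper cs
    else if c == ' ' || c == '_' then
      convA_loop (index + 1) (converted ++ ['_']) true cs
    else if next_upper then
      convA_loop (index + 1) (converted ++ [PySem.Chars.upperChar c]) false cs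
    else
      convA_loop (index + 1) (converted ++ [PySem.Chars.lowerChar c]) false cs

def convertRegionNameForDotlan (name : String) : String :=
  String.ofList (convA_loop 0 [] false name.toList)

-- ===== PORT B =====
def convertRegionNameForDotlan_alt (name : String) : String :=
  match name.toList with
  | [] => ""
  | h :: rest =>
    let parts := PySem.Chars.splitOn (PySem.Chars.replace rest [' '] ['_']) ['_']
    let out := PySem.Chars.lower (parts.headD []) ::
      parts.tail.map (fun p =>
        '_' :: (PySem.Chars.upper (p.take 1) ++ PySem.Chars.lower (p.drop 1)))
    String.ofList (PySem.Chars.upperChar h :: out.flatten)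

-- ===== PRECONDITION & SPEC =====
def Spec_convertRegionNameForDotlan (name : String) (out : String) : Prop := out = convertRegionNameForDotlan_alt name
instance (name : String) (out : String) : Decidable (Spec_convertRegionNameForDotlan name out) := by unfold Spec_convertRegionNameForDotlan; infer_instance

-- ===== CLAIM (what is proved, stated in full; the proofs are below) =====
def Claim_equal_convertRegionNameForDotlan : Prop := ∀ (name : String), Dom_convertRegionNameForDotlan name → Spec_convertRegionNameForDotlan name (convertRegionNameForDotlan name)

-- ===== LEMMAS AND PROOFS =====

-- the per-character spec both programs compute: flag = A's next_upper
def pvF : Bool → List Char → List Char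
  | _, [] => []
  | flag, c :: cs =>
    if c = ' ' ∨ c = '_' then '_' :: pvF true cs
    else (if flag then PySem.Chars.upperChar c else PySem.Chars.lowerChar c) :: pvF false cs

-- single-char " "→"_" substitution
def pvSubst (c : Char) : Char := if c = ' ' then '_' else c

-- split on '_' keeping empty segments (Python's s.split("_"))
def pvS : List Char → List (List Char)
  | [] => [[]]
  | c :: t =>
    if c = '_' then [] :: pvS t
    else
      match pvS t with
      | [] => [[c]]
      | p :: ps => (c :: p) :: ps

def pvMH (pre : List Char) : List (List Char) → List (List Char)
  | [] => [pre]
  | p :: ps => (pre ++ p) :: ps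

lemma pvS_ne_nil (l : List Char) : pvS l ≠ [] := by
  cases l with
  | nil => simp [pvS]
  | cons c t =>
    simp only [pvS]
    split
    · simp
    · split <;> simp

lemma replace_go_subst (fuel : Nat) : ∀ (l acc : List Char), l.length ≤ fuel →
    PySem.Chars.replace.go [' '] ['_'] fuel l acc = acc.reverse ++ l.map pvSubst := by
  induction fuel with
  | zero =>
    intro l acc h
    have : l = [] := by cases l <;> simp_all
    subst this; simp [PySem.Chars.replace.go]
  | succ n ih =>
    intro l acc h
    cases l with
    | nil => simp [PySem.Chars.replace.go]
    | cons c t =>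
      by_cases hc : c = ' '
      · subst hc
        have hp : List.isPrefixOf [' '] (' ' :: t) = true := by simp [List.isPrefixOf]
        simp only [PySem.Chars.replace.go, hp, if_pos, List.length_cons, List.drop_succ_cons, List.length_nil,
          List.drop_zero, List.singleton_append, List.reverse_cons, List.reverse_nil, List.nil_append]
        rw [ih t ('_' :: acc) (by simpa using Nat.le_of_succ_le_succ h)]
        simp [pvSubst]
      · have hp : List.isPrefixOf [' '] (c :: t) = false := by
          simp only [List.isPrefixOf_cons₂, List.isPrefixOf_nil_left, Bool.and_true,
            beq_eq_false_iff_ne, ne_eq]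
          exact fun h => hc h.symm
        simp only [PySem.Chars.replace.go, hp]
        rw [if_neg (by simp)]
        rw [ih t (c :: acc) (by simpa using Nat.le_of_succ_le_succ h)]
        simp [pvSubst, hc]

lemma replace_eq_map_subst (l : List Char) :
    PySem.Chars.replace l [' '] ['_'] = l.map pvSubst := by
  rw [PySem.Chars.replace]
  simp only [List.isEmpty_cons, if_false, Bool.false_eq_true]
  exact (replace_go_subst l.length l [] le_rfl).trans (by simp)

lemma splitOn_go_S (fuel : Nat) : ∀ (l cur : List Char) (acc : List (List Char)),
    l.length ≤ fuel →
    PySem.Chars.splitOn.go ['_'] fuel l cur acc = acc.reverse ++ pvMH cur.reverse (pvS l) := by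
  induction fuel with
  | zero =>
    intro l cur acc h
    have : l = [] := by cases l <;> simp_all
    subst this; simp [PySem.Chars.splitOn.go, pvS, pvMH]
  | succ n ih =>
    intro l cur acc h
    cases l with
    | nil => simp [PySem.Chars.splitOn.go, pvS, pvMH]
    | cons c t =>
      by_cases hc : c = '_'
      · subst hc
        have hp : List.isPrefixOf ['_'] ('_' :: t) = true := by simp [List.isPrefixOf]
        simp only [PySem.Chars.splitOn.go, hp, if_pos, List.length_cons, List.drop_succ_cons, List.length_nil,
          List.drop_zero]
        rw [ih t [] (cur.reverse :: acc) (by simpa using Nat.le_of_succ_le_succ h)]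
        cases hS : pvS t with
        | nil => exact absurd hS (pvS_ne_nil t)
        | cons p ps => simp [pvS, pvMH, hS]
      · have hp : List.isPrefixOf ['_'] (c :: t) = false := by
          simp only [List.isPrefixOf_cons₂, List.isPrefixOf_nil_left, Bool.and_true,
            beq_eq_false_iff_ne, ne_eq]
          exact fun h => hc h.symm
        simp only [PySem.Chars.splitOn.go, hp]
        rw [if_neg (by simp)]
        rw [ih t (c :: cur) acc (by simpa using Nat.le_of_succ_le_succ h)]
        cases hS : pvS t with
        | nil => exact absurd hS (pvS_ne_nil t)
        | cons p ps => simp [pvS, pvMH, hS, hc]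

lemma splitOn_eq_S (l : List Char) : PySem.Chars.splitOn l ['_'] = pvS l := by
  rw [PySem.Chars.splitOn]
  rw [splitOn_go_S (l.length + 1) l [] [] (Nat.le_succ _)]
  cases hS : pvS l with
  | nil => exact absurd hS (pvS_ne_nil l)
  | cons p ps => simp [pvMH]

-- B's joining of the split parts computes pvF
def pvCap (p : List Char) : List Char :=
  PySem.Chars.upper (p.take 1) ++ PySem.Chars.lower (p.drop 1)

def pvJoin (cap0 : Bool) (ps : List (List Char)) : List Char :=
  (if cap0 then pvCap (ps.headD []) else PySem.Chars.lower (ps.headD [])) ++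
    (ps.tail.map (fun p => '_' :: pvCap p)).flatten

lemma join_S_eq_F (cs : List Char) :
    pvJoin false (pvS (cs.map pvSubst)) = pvF false cs ∧
    pvJoin true (pvS (cs.map pvSubst)) = pvF true cs := by
  induction cs with
  | nil => simp [pvJoin, pvS, pvF, pvCap, PySem.Chars.lower, PySem.Chars.upper]
  | cons c t ih =>
    obtain ⟨ihF, ihT⟩ := ih
    by_cases hc : c = ' ' ∨ c = '_'
    · have hs : pvSubst c = '_' := by
        rcases hc with h | h <;> simp [pvSubst, h]
      have hSplit : pvS (List.map pvSubst (c :: t)) = [] :: pvS (List.map pvSubst t) := by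
        simp [hs, pvS]
      have hF : ∀ b, pvF b (c :: t) = '_' :: pvF true t := by
        intro b; simp [pvF, hc]
      cases hS : pvS (List.map pvSubst t) with
      | nil => exact absurd hS (pvS_ne_nil _)
      | cons p ps =>
        rw [hS] at ihT
        have key : ∀ b, pvJoin b ([] :: p :: ps) = '_' :: pvJoin true (p :: ps) := by
          intro b; cases b <;> rfl
        constructor <;> rw [hSplit, hS, key, ihT, hF]
    · have hs : pvSubst c = c := by
        simp only [pvSubst, ite_eq_right_iff]
        intro h; exact absurd (Or.inl h) hc
      have hne : ¬ c = '_' := fun h => hc (Or.inr h)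
      cases hS : pvS (List.map pvSubst t) with
      | nil => exact absurd hS (pvS_ne_nil _)
      | cons p ps =>
        have hSplit : pvS (List.map pvSubst (c :: t)) = (c :: p) :: ps := by
          simp only [List.map_cons, hs, pvS, hne, if_false, hS]
        have hcap : pvCap (c :: p) = PySem.Chars.upperChar c :: PySem.Chars.lower p := by
          simp [pvCap, PySem.Chars.upper, PySem.Chars.lower]
        have hlow : PySem.Chars.lower (c :: p) = PySem.Chars.lowerChar c :: PySem.Chars.lower p := by
          simp [PySem.Chars.lower]
        have hJ : ∀ b, pvJoin b (pvS (List.map pvSubst (c :: t)))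
            = (if b then PySem.Chars.upperChar c else PySem.Chars.lowerChar c)
              :: pvJoin false (pvS (List.map pvSubst t)) := by
          intro b
          rw [hSplit, hS]
          cases b <;>
            simp only [pvJoin, List.headD_cons, List.tail_cons, hcap, hlow,
              if_true, if_false, List.cons_append, Bool.false_eq_true]
        have hFc : ∀ b, pvF b (c :: t)
            = (if b then PySem.Chars.upperChar c else PySem.Chars.lowerChar c) :: pvF false t := by
          intro b; simp [pvF, hc]
        constructor <;> rw [hJ, hFc, ihF]

-- A's loop past index 0 computes pvF
lemma convA_loop_eq_F (cs : List Char) : ∀ (n : Nat) (conv : List Char) (flag : Bool),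
    convA_loop (n + 1) conv flag cs = conv ++ pvF flag cs := by
  induction cs with
  | nil => intro n conv flag; simp [convA_loop, pvF]
  | cons c t ih =>
    intro n conv flag
    by_cases hc : c = ' ' ∨ c = '_'
    · have hb : (c == ' ' || c == '_') = true := by
        rcases hc with h | h <;> simp [h]
      simp [convA_loop, hb, ih, pvF, hc]
    · have hb : (c == ' ' || c == '_') = false := by
        rcases (not_or.mp hc) with ⟨h1, h2⟩; simp [h1, h2]
      cases flag <;> simp [convA_loop, hb, ih, pvF, hc]

-- ===== VERDICT (by name: the statement is the Claim_ definition above) =====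
theorem convertRegionNameForDotlan_spec : Claim_equal_convertRegionNameForDotlan := by
  intro name _
  unfold Spec_convertRegionNameForDotlan convertRegionNameForDotlan convertRegionNameForDotlan_alt
  cases h : name.toList with
  | nil => simp [convA_loop]
  | cons hd t =>
    have h0 : convA_loop 0 [] false (hd :: t) = convA_loop 1 [PySem.Chars.upperChar hd] false t := by
      simp [convA_loop]
    have h1 := convA_loop_eq_F t 0 [PySem.Chars.upperChar hd] false
    norm_num at h1
    rw [h0, h1]
    show String.ofList (PySem.Chars.upperChar hd :: pvF false t)
        = String.ofList (PySem.Chars.upperChar hd ::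
            pvJoin false (PySem.Chars.splitOn (PySem.Chars.replace t [' '] ['_']) ['_']))
    rw [replace_eq_map_subst, splitOn_eq_S, (join_S_eq_F t).1]
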